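-- pv_equiv track=rewrite | github.com/samudragupto/LeetCode | Minimum Stability Factor of Array.py | minStable
-- ===== SOURCE A (Python) =====
-- import math
--
-- def minStable(nums, maxC):
--     n = len(nums)
--
--     single_count = sum(1 for x in nums if x >= 2)
--     if maxC >= single_count:
--         return 0
--
--     LOG = n.bit_length()
--     st = [[0]*n for _ in range(LOG)]
--     for i in range(n):
--         st[0][i] = nums[i]
--     j = 1
--     while (1 << j) <= n:
--         length = 1 << j
--         half = length >> 1
--         for i in range(n - length + 1):
--             st[j][i] = math.gcd(st[j-1][i], st[j-1][i+half])
--         j += 1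
--
--     def range_gcd(l, r):
--         k = (r-l+1).bit_length() - 1
--         return math.gcd(st[k][l], st[k][r - (1<<k) + 1])
--
--     def can(K):
--         if K >= n:
--             return True
--
--         modifications = 0
--         i = 0
--
--         while i <= n - K - 1:
--             if range_gcd(i, i + K) >= 2:
--                 modifications += 1
--                 if modifications > maxC:
--                     return False
--                 i += K + 1
--             else:
--                 i += 1
--
--         return True
--
--     lo, hi, ans = 1, n, n
--     while lo <= hi:
--         mid = (lo + hi) // 2
--         if can(mid):
--             ans = mid
--             hi = mid - 1
--         else:
--             lo = mid + 1
--
--     return ans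
-- ===== SOURCE B (Python) =====
-- import math
--
-- def minStable(nums, maxC):
--     n = len(nums)
--
--     single_count = sum(1 for x in nums if x >= 2)
--     if maxC >= single_count:
--         return 0
--
--     def window_gcd(l, r):
--         g = 0
--         for x in nums[l:r+1]:
--             g = math.gcd(g, x)
--             if g == 1:
--                 break
--         return g
--
--     def can(K):
--         if K >= n:
--             return True
--         modifications = 0
--         i = 0
--         while i <= n - K - 1:
--             if window_gcd(i, i + K) >= 2:
--                 modifications += 1
--                 if modifications > maxC:
--                     return False
--                 i += K + 1
--             else:
--                 i += 1
--         return True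
--
--     lo, hi, ans = 1, n, n
--     while lo <= hi:
--         mid = (lo + hi) // 2
--         if can(mid):
--             ans = mid
--             hi = mid - 1
--         else:
--             lo = mid + 1
--     return ans
-- ===== Notes on version B (the rewrite author's own statement) =====
-- stated objective: simpler
-- what changed: The sparse table (doubling st array built in O(n log n) plus bit-length O(1) range_gcd lookups) is removed entirely; each window's gcd is computed by a direct fold over the slice nums[l:r+1] that stops as soon as the running gcd reaches 1 (gcd with 1 stays 1, so the value is unchanged).
import Mathlib
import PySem

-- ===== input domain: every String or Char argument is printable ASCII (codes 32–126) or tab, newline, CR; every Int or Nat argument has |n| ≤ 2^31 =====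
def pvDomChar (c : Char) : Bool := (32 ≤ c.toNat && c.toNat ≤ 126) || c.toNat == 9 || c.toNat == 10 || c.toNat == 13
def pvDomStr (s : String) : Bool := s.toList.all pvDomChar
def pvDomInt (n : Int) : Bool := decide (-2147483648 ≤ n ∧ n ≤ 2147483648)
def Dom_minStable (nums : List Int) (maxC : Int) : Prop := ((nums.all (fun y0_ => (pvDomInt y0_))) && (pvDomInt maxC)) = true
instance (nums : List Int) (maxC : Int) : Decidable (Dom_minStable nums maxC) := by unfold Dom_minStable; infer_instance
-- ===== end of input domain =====

-- B replaces A's sparse table (doubling array + bit-length O(1) range queries) by a direct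
-- gcd fold over each window slice; no preprocessing structure remains (objective: simpler).

-- ===== PORT A =====

-- math.gcd (two arguments): nonnegative gcd of absolute values
def pyGcd (a b : Int) : Int := (Int.gcd a b : Int)

-- 'for i in range(m): row[i] = f(i)' on a preallocated list
def pvSetLoop (row : List Int) (m : Nat) (f : Nat → Int) : List Int :=
  (List.range m).foldl (fun r i => r.set i (f i)) row

-- 'st[0][i] = nums[i]' loop on the [0]*n row
def pvRow0 (nums : List Int) : List Int :=
  pvSetLoop (List.replicate nums.length 0) nums.length (fun i => nums.getD i 0)

-- 'while (1 << j) <= n: … j += 1' building rows j, j+1, …  (fuel bounds the loop; n is enough)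
def pvBuildRows (prev : List Int) (n j fuel : Nat) : List (List Int) :=
  match fuel with
  | 0 => []
  | fuel + 1 =>
    if 1 <<< j ≤ n then
      let length := 1 <<< j
      let half := length >>> 1
      let row := pvSetLoop (List.replicate n 0) (n - length + 1)
        (fun i => pyGcd (prev.getD i 0) (prev.getD (i + half) 0))
      row :: pvBuildRows row n (j + 1) fuel
    else []

-- the whole table st (row 0, then the while-loop rows)
def pvStOf (nums : List Int) : List (List Int) :=
  pvRow0 nums :: pvBuildRows (pvRow0 nums) nums.length 1 nums.length

-- def range_gcd(l, r); Python's int expression r - (1<<k) + 1 is written r + 1 - (1<<<k)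
-- because the value is the same over ℤ (1<<k ≤ r+1 at every call) and ℕ subtraction truncates
def pvRangeGcd (st : List (List Int)) (l r : Nat) : Int :=
  let k := PySem.Int.bitLength ((r - l + 1 : Nat) : Int) - 1
  pyGcd ((st.getD k []).getD l 0) ((st.getD k []).getD (r + 1 - (1 <<< k)) 0)

-- the 'while i <= n - K - 1' greedy loop of can(K) (fuel n is enough: i grows each step)
def pvCanLoopA (st : List (List Int)) (n K : Nat) (maxC : Int) (i : Nat) (mods : Int) (fuel : Nat) : Bool :=
  match fuel with
  | 0 => true
  | fuel + 1 =>
    if i ≤ n - K - 1 then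
      if pvRangeGcd st i (i + K) ≥ 2 then
        if mods + 1 > maxC then false
        else pvCanLoopA st n K maxC (i + K + 1) (mods + 1) fuel
      else pvCanLoopA st n K maxC (i + 1) mods fuel
    else true

-- def can(K)
def pvCanA (st : List (List Int)) (n : Nat) (maxC : Int) (K : Nat) : Bool :=
  if n ≤ K then true else pvCanLoopA st n K maxC 0 0 n

-- the binary-search 'while lo <= hi' loop (fuel n+1 is enough: hi-lo shrinks each step)
def pvBSearchA (st : List (List Int)) (n : Nat) (maxC : Int) (lo hi ans fuel : Nat) : Nat :=
  match fuel with
  | 0 => ans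
  | fuel + 1 =>
    if lo ≤ hi then
      let mid := (lo + hi) / 2
      if pvCanA st n maxC mid then pvBSearchA st n maxC lo (mid - 1) mid fuel
      else pvBSearchA st n maxC (mid + 1) hi ans fuel
    else ans

def minStable (nums : List Int) (maxC : Int) : Int :=
  let n := nums.length
  let single_count : Int := nums.foldl (fun acc x => if x ≥ 2 then acc + 1 else acc) 0
  if maxC ≥ single_count then 0
  else
    let st := pvStOf nums
    ((pvBSearchA st n maxC 1 n n (n + 1) : Nat) : Int)

-- ===== PORT B =====

-- the 'for x in nums[l:r+1]' loop of window_gcd, with its 'if g == 1: break'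
def pvWinFold (xs : List Int) (g : Int) : Int :=
  match xs with
  | [] => g
  | x :: xs =>
      let g' := pyGcd g x
      if g' == 1 then g' else pvWinFold xs g'

-- def window_gcd(l, r)
def pvWinGcd (nums : List Int) (l r : Nat) : Int :=
  pvWinFold (PySem.List.slice nums (some (l : Int)) (some ((r : Int) + 1))) 0

def pvCanLoopB (nums : List Int) (n K : Nat) (maxC : Int) (i : Nat) (mods : Int) (fuel : Nat) : Bool :=
  match fuel with
  | 0 => true
  | fuel + 1 =>
    if i ≤ n - K - 1 then
      if pvWinGcd nums i (i + K) ≥ 2 then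
        if mods + 1 > maxC then false
        else pvCanLoopB nums n K maxC (i + K + 1) (mods + 1) fuel
      else pvCanLoopB nums n K maxC (i + 1) mods fuel
    else true

def pvCanB (nums : List Int) (n : Nat) (maxC : Int) (K : Nat) : Bool :=
  if n ≤ K then true else pvCanLoopB nums n K maxC 0 0 n

def pvBSearchB (nums : List Int) (n : Nat) (maxC : Int) (lo hi ans fuel : Nat) : Nat :=
  match fuel with
  | 0 => ans
  | fuel + 1 =>
    if lo ≤ hi then
      let mid := (lo + hi) / 2
      if pvCanB nums n maxC mid then pvBSearchB nums n maxC lo (mid - 1) mid fuel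
      else pvBSearchB nums n maxC (mid + 1) hi ans fuel
    else ans

def minStable_alt (nums : List Int) (maxC : Int) : Int :=
  let n := nums.length
  let single_count : Int := nums.foldl (fun acc x => if x ≥ 2 then acc + 1 else acc) 0
  if maxC ≥ single_count then 0
  else ((pvBSearchB nums n maxC 1 n n (n + 1) : Nat) : Int)

-- ===== PRECONDITION & SPEC =====
def Spec_minStable (nums : List Int) (maxC : Int) (out : Int) : Prop := out = minStable_alt nums maxC
instance (nums : List Int) (maxC : Int) (out : Int) : Decidable (Spec_minStable nums maxC out) := by unfold Spec_minStable; infer_instance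

-- ===== CLAIM (what is proved, stated in full; the proofs are below) =====
def Claim_equal_minStable : Prop := ∀ (nums : List Int) (maxC : Int), Dom_minStable nums maxC → Spec_minStable nums maxC (minStable nums maxC)

-- ===== LEMMAS AND PROOFS =====

-- gcd (as Nat, on absolute values) of the segment nums[a : a+len]
def gcdN (nums : List Int) (a len : Nat) : Nat :=
  ((nums.drop a).take len).foldl (fun g x => Nat.gcd g x.natAbs) 0

theorem pyGcd_natAbs (a b : Int) : pyGcd a b = ((Nat.gcd a.natAbs b.natAbs : Nat) : Int) := by
  simp [pyGcd, Int.gcd]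

theorem foldInt_eq_foldNat (ys : List Int) (g : Nat) :
    ys.foldl (fun g x => pyGcd g x) (g : Int)
      = ((ys.foldl (fun g x => Nat.gcd g x.natAbs) g : Nat) : Int) := by
  induction ys generalizing g with
  | nil => rfl
  | cons y ys ih =>
      simp only [List.foldl_cons, pyGcd_natAbs]
      rw [show (Int.natAbs (g:Int)) = g by simp] at *
      exact ih _

theorem foldNat_start (ys : List Int) (s : Nat) :
    ys.foldl (fun g x => Nat.gcd g x.natAbs) s
      = Nat.gcd s (ys.foldl (fun g x => Nat.gcd g x.natAbs) 0) := by
  induction ys generalizing s with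
  | nil => simp
  | cons y ys ih =>
      simp only [List.foldl_cons]
      rw [ih (Nat.gcd s y.natAbs), ih (Nat.gcd 0 y.natAbs), Nat.gcd_assoc]
      simp

theorem foldNat_append (xs ys : List Int) :
    (xs ++ ys).foldl (fun g x => Nat.gcd g x.natAbs) 0
      = Nat.gcd (xs.foldl (fun g x => Nat.gcd g x.natAbs) 0)
               (ys.foldl (fun g x => Nat.gcd g x.natAbs) 0) := by
  rw [List.foldl_append, foldNat_start]

theorem gcdN_merge (nums : List Int) (a b m : Nat) (hab : a ≤ b) (hba : b ≤ a + m) :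
    Nat.gcd (gcdN nums a m) (gcdN nums b m) = gcdN nums a (b + m - a) := by
  set u := b - a with hu
  have hum : u ≤ m := by omega
  have h1 : (nums.drop a).take m
      = (nums.drop a).take u ++ ((nums.drop b).take (m - u)) := by
    conv_lhs => rw [show m = u + (m - u) by omega, List.take_add]
    rw [List.drop_drop, show a + u = b by omega]
  have h2 : (nums.drop b).take m
      = (nums.drop b).take (m - u) ++ ((nums.drop (a + m)).take u) := by
    conv_lhs => rw [show m = (m - u) + u by omega, List.take_add]
    rw [List.drop_drop, show b + (m - u) = a + m by omega]
  have h3 : (nums.drop a).take (b + m - a)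
      = (nums.drop a).take u ++ (((nums.drop b).take (m - u)) ++ ((nums.drop (a + m)).take u)) := by
    conv_lhs => rw [show b + m - a = u + m by omega, List.take_add]
    rw [List.drop_drop, show a + u = b by omega, h2]
  unfold gcdN
  rw [h1, h2, h3, foldNat_append, foldNat_append, foldNat_append, foldNat_append]
  rw [Nat.gcd_assoc]
  congr 1
  rw [← Nat.gcd_assoc, Nat.gcd_self]

theorem pvSetLoop_length (row : List Int) (m : Nat) (f : Nat → Int) :
    (pvSetLoop row m f).length = row.length := by
  unfold pvSetLoop
  induction m with
  | zero => rfl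
  | succ m ih =>
      rw [List.range_succ, List.foldl_append]
      simp [ih]

theorem pvSetLoop_getElem? (row : List Int) (m : Nat) (f : Nat → Int) (i : Nat) :
    (pvSetLoop row m f)[i]? = if i < m ∧ i < row.length then some (f i) else row[i]? := by
  induction m with
  | zero => simp [pvSetLoop]
  | succ m ih =>
      have hlen : (pvSetLoop row m f).length = row.length := pvSetLoop_length row m f
      unfold pvSetLoop at *
      rw [List.range_succ, List.foldl_append]
      simp only [List.foldl_cons, List.foldl_nil, List.getElem?_set]
      by_cases hm : m = i
      · subst hm
        by_cases h : m < row.length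
        · simp [hlen, h]
        · simp [hlen, h]
      · simp only [hm, if_false, ih]
        by_cases h1 : i < m
        · simp [h1, show i < m + 1 by omega]
        · by_cases h2 : i < m + 1
          · omega
          · simp [h1, h2]

theorem pvSetLoop_getD (row : List Int) (m : Nat) (f : Nat → Int) (i : Nat)
    (h1 : i < m) (h2 : i < row.length) :
    (pvSetLoop row m f).getD i 0 = f i := by
  rw [List.getD_eq_getElem?_getD, pvSetLoop_getElem?]
  simp [h1, h2]

-- the table invariant for one row
def RowInv (nums : List Int) (j : Nat) (row : List Int) : Prop :=
  row.length = nums.length ∧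
  ∀ i, i + 2 ^ j ≤ nums.length → (row.getD i 0).natAbs = gcdN nums i (2 ^ j)

theorem row0_inv (nums : List Int) : RowInv nums 0 (pvRow0 nums) := by
  constructor
  · unfold pvRow0; rw [pvSetLoop_length]; simp
  · intro i hi
    have hin : i < nums.length := by omega
    have h2 : i < (List.replicate nums.length (0:Int)).length := by simp; omega
    unfold pvRow0
    rw [pvSetLoop_getD _ _ _ _ (by omega) h2]
    have hdrop : nums.drop i = nums[i] :: nums.drop (i + 1) := List.drop_eq_getElem_cons hin
    unfold gcdN
    rw [pow_zero, hdrop]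
    have htake : List.take 1 (nums[i] :: nums.drop (i + 1)) = [nums[i]] := rfl
    rw [htake]
    have hfold : List.foldl (fun g x => Nat.gcd g x.natAbs) 0 [nums[i]] = Nat.gcd 0 (nums[i]).natAbs := rfl
    rw [hfold, Nat.gcd_zero_left, List.getD_eq_getElem?_getD, List.getElem?_eq_getElem hin]
    rfl

theorem buildRows_inv (nums : List Int) : ∀ (fuel j : Nat) (prev : List Int), 1 ≤ j →
    RowInv nums (j - 1) prev →
    ∀ k, k < (pvBuildRows prev nums.length j fuel).length →
      RowInv nums (j + k) ((pvBuildRows prev nums.length j fuel).getD k []) := by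
  intro fuel
  induction fuel with
  | zero => intro j prev _ _ k hk; simp [pvBuildRows] at hk
  | succ fuel ih =>
      intro j prev hj hprev k hk
      unfold pvBuildRows at hk ⊢
      by_cases hcond : 1 <<< j ≤ nums.length
      · simp only [hcond, if_true] at hk ⊢
        have hpow : (1 : Nat) <<< j = 2 ^ j := by simp [Nat.shiftLeft_eq]
        have hp2 : 2 ^ (j - 1) * 2 = 2 ^ j := by
          rw [← pow_succ]; congr 1; omega
        have hhalf : (1 : Nat) <<< j >>> 1 = 2 ^ (j - 1) := by
          rw [hpow, Nat.shiftRight_eq_div_pow, pow_one, ← hp2]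
          simp
        have hrow : RowInv nums j
            (pvSetLoop (List.replicate nums.length 0) (nums.length - 1 <<< j + 1)
              (fun i => pyGcd (prev.getD i 0) (prev.getD (i + 1 <<< j >>> 1) 0))) := by
          constructor
          · rw [pvSetLoop_length]; simp
          · intro i hi
            rw [hpow] at hcond
            have hjpos : 0 < 2 ^ j := Nat.two_pow_pos j
            rw [pvSetLoop_getD _ _ _ _ (by rw [hpow]; omega) (by simp; omega)]
            rw [pyGcd_natAbs, hhalf]
            obtain ⟨hlen, hval⟩ := hprev
            rw [show (((Nat.gcd (prev.getD i 0).natAbs (prev.getD (i + 2 ^ (j-1)) 0).natAbs : Nat)) : Int).natAbs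
                = Nat.gcd (prev.getD i 0).natAbs (prev.getD (i + 2 ^ (j-1)) 0).natAbs by simp]
            rw [hval i (by omega), hval (i + 2 ^ (j - 1)) (by omega)]
            have hm := gcdN_merge nums i (i + 2 ^ (j - 1)) (2 ^ (j - 1)) (by omega) (by omega)
            rw [hm, show i + 2 ^ (j-1) + 2 ^ (j-1) - i = 2 ^ j by omega]
        match k with
        | 0 => simpa using hrow
        | k + 1 =>
            rw [List.getD_cons_succ, show j + (k + 1) = (j + 1) + k by omega]
            exact ih (j + 1) _ (by omega) (by simpa using hrow) k
              (by simp only [List.length_cons] at hk; omega)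
      · simp [hcond] at hk

theorem stOf_inv (nums : List Int) :
    ∀ k, k < (pvStOf nums).length → RowInv nums k ((pvStOf nums).getD k []) := by
  intro k hk
  unfold pvStOf at hk ⊢
  match k with
  | 0 => simpa using row0_inv nums
  | k + 1 =>
      simp only [List.length_cons] at hk
      have := buildRows_inv nums nums.length 1 (pvRow0 nums) (by omega) (by simpa using row0_inv nums) k (by omega)
      simpa [show 1 + k = k + 1 by omega] using this

theorem buildRows_long (nums : List Int) : ∀ (fuel j t : Nat) (prev : List Int),
    t < fuel → 2 ^ (j + t) ≤ nums.length → t < (pvBuildRows prev nums.length j fuel).length := by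
  intro fuel
  induction fuel with
  | zero => intro j t prev h _; omega
  | succ fuel ih =>
      intro j t prev ht hle
      unfold pvBuildRows
      have hcond : 1 <<< j ≤ nums.length := by
        rw [Nat.shiftLeft_eq]
        calc 1 * 2 ^ j = 2 ^ j := by ring
        _ ≤ 2 ^ (j + t) := Nat.pow_le_pow_right (by omega) (by omega)
        _ ≤ nums.length := hle
      simp only [hcond, if_true, List.length_cons]
      match t with
      | 0 => omega
      | t + 1 =>
          exact Nat.succ_lt_succ (ih (j + 1) t _ (by omega)
            (by rw [show j + 1 + t = j + (t + 1) by omega]; exact hle))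

theorem stOf_long (nums : List Int) (k : Nat) (h : 2 ^ k ≤ nums.length) :
    k < (pvStOf nums).length := by
  unfold pvStOf
  simp only [List.length_cons]
  match k with
  | 0 => omega
  | t + 1 =>
      have h2 : t + 1 < 2 ^ (t + 1) := Nat.lt_two_pow_self
      have := buildRows_long nums nums.length 1 t (pvRow0 nums) (by omega)
        (by rw [show 1 + t = t + 1 by omega]; exact h)
      omega

theorem rangeGcd_eq (nums : List Int) (l r : Nat) (hlr : l ≤ r) (hr : r < nums.length) :
    pvRangeGcd (pvStOf nums) l r = ((gcdN nums l (r + 1 - l) : Nat) : Int) := by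
  simp only [pvRangeGcd]
  set len := r - l + 1 with hlen
  have hlen1 : 1 ≤ len := by omega
  have hbl_lt : len < 2 ^ PySem.Int.bitLength (len : Int) := by
    have := PySem.Int.lt_two_pow_bitLength (len : Int)
    simpa using this
  have hbl_pos : 1 ≤ PySem.Int.bitLength (len : Int) := by
    by_contra h
    have h0 : PySem.Int.bitLength (len : Int) = 0 := by omega
    rw [h0, pow_zero] at hbl_lt
    omega
  have hbl_le : 2 ^ (PySem.Int.bitLength (len : Int) - 1) ≤ len := by
    have := PySem.Int.two_pow_bitLength_le (len : Int) (Int.natCast_ne_zero.mpr (by omega))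
    simpa using this
  set k := PySem.Int.bitLength (len : Int) - 1 with hk
  have hpowle : 2 ^ k ≤ len := hbl_le
  have hpowgt : len < 2 ^ (k + 1) := by rw [show k + 1 = PySem.Int.bitLength (len : Int) by omega]; exact hbl_lt
  have hkst : k < (pvStOf nums).length := stOf_long nums k (by omega)
  obtain ⟨hrowlen, hval⟩ := stOf_inv nums k hkst
  have hshift : (1 : Nat) <<< k = 2 ^ k := by simp [Nat.shiftLeft_eq]
  rw [hshift, pyGcd_natAbs]
  rw [hval l (by omega), hval (r + 1 - 2 ^ k) (by omega)]
  rw [gcdN_merge nums l (r + 1 - 2 ^ k) (2 ^ k) (by omega) (by omega)]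
  rw [show r + 1 - 2 ^ k + 2 ^ k - l = r + 1 - l by omega]

theorem foldl_pyGcd_one (xs : List Int) : xs.foldl (fun g x => pyGcd g x) 1 = 1 := by
  induction xs with
  | nil => rfl
  | cons x xs ih =>
      simp only [List.foldl_cons]
      rw [show pyGcd 1 x = 1 by simp [pyGcd], ih]

theorem pvWinFold_eq_foldl (xs : List Int) : ∀ g, pvWinFold xs g = xs.foldl (fun g x => pyGcd g x) g := by
  induction xs with
  | nil => intro g; rfl
  | cons x xs ih =>
      intro g
      unfold pvWinFold
      simp only [List.foldl_cons]
      by_cases h : pyGcd g x = 1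
      · simp only [h]
        rw [foldl_pyGcd_one]
        simp
      · have : (pyGcd g x == 1) = false := by simp [h]
        simp only [this, Bool.false_eq_true, if_false]
        exact ih _

theorem winGcd_eq (nums : List Int) (l r : Nat) :
    pvWinGcd nums l r = ((gcdN nums l (r + 1 - l) : Nat) : Int) := by
  unfold pvWinGcd
  rw [pvWinFold_eq_foldl]
  rw [show ((r : Int) + 1) = ((r + 1 : Nat) : Int) by push_cast; ring]
  rw [PySem.List.slice_natCast]
  rw [show ((0 : Int)) = ((0 : Nat) : Int) by simp, foldInt_eq_foldNat]
  rfl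

theorem canLoop_congr (nums : List Int) (K : Nat) (maxC : Int) (hK : K < nums.length) :
    ∀ (fuel i : Nat) (mods : Int),
      pvCanLoopA (pvStOf nums) nums.length K maxC i mods fuel
        = pvCanLoopB nums nums.length K maxC i mods fuel := by
  intro fuel
  induction fuel with
  | zero => intro i mods; rfl
  | succ fuel ih =>
      intro i mods
      unfold pvCanLoopA pvCanLoopB
      by_cases hi : i ≤ nums.length - K - 1
      · simp only [hi, if_true]
        rw [rangeGcd_eq nums i (i + K) (by omega) (by omega),
            winGcd_eq nums i (i + K)]
        by_cases hg : ((gcdN nums i (i + K + 1 - i) : Nat) : Int) ≥ 2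
        · simp only [hg, if_true]
          by_cases hm : mods + 1 > maxC
          · simp [hm]
          · simp only [hm, if_false]
            exact ih _ _
        · simp only [hg, if_false]
          exact ih _ _
      · simp [hi]

theorem can_congr (nums : List Int) (maxC : Int) (K : Nat) :
    pvCanA (pvStOf nums) nums.length maxC K = pvCanB nums nums.length maxC K := by
  unfold pvCanA pvCanB
  by_cases h : nums.length ≤ K
  · simp [h]
  · simp only [h, if_false]
    exact canLoop_congr nums K maxC (by omega) nums.length 0 0

theorem bsearch_congr (nums : List Int) (maxC : Int) :
    ∀ (fuel lo hi ans : Nat),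
      pvBSearchA (pvStOf nums) nums.length maxC lo hi ans fuel
        = pvBSearchB nums nums.length maxC lo hi ans fuel := by
  intro fuel
  induction fuel with
  | zero => intro lo hi ans; rfl
  | succ fuel ih =>
      intro lo hi ans
      unfold pvBSearchA pvBSearchB
      by_cases h : lo ≤ hi
      · simp only [h, if_true, can_congr nums maxC]
        by_cases hc : pvCanB nums nums.length maxC ((lo + hi) / 2)
        · simp only [hc, if_true]; exact ih _ _ _
        · simp only [hc]; exact ih _ _ _
      · simp [h]

-- ===== VERDICT (by name: the statement is the Claim_ definition above) =====
theorem minStable_spec : Claim_equal_minStable := by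
  intro nums maxC _
  unfold Spec_minStable minStable minStable_alt
  by_cases h : maxC ≥ nums.foldl (fun acc x => if x ≥ 2 then acc + 1 else acc) 0
  · simp [h]
  · simp only [h, if_false]
    rw [bsearch_congr nums maxC]
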